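-- pv_equiv track=rewrite | github.com/mhoonjeon/problemsolving | algorithm/goormedu/2016_mock_test_from_previous_exams/Q3-find-word.py | check_rule_one
-- ===== SOURCE A (Python) =====
-- moeum = ['a', 'e', 'i', 'o', 'u']
--
-- def check_rule_one(word):
--     for i in range(len(word)-1):
--         if word[i] in moeum:
--             if word[i+1] in moeum:
--                 return True
--             else:
--                 i += i
--     return False
-- ===== SOURCE B (Python) =====
-- def check_rule_one(word):
--     return any(a + b in word for a in "aeiou" for b in "aeiou")
-- ===== Notes on version B (the rewrite author's own statement) =====
-- stated objective: alternative
-- what changed: Instead of scanning the word character by character, B enumerates the 25 two-vowel patterns and asks whether any of them occurs as a substring of the word (pattern-set containment search instead of a positional scan).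
import Mathlib
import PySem

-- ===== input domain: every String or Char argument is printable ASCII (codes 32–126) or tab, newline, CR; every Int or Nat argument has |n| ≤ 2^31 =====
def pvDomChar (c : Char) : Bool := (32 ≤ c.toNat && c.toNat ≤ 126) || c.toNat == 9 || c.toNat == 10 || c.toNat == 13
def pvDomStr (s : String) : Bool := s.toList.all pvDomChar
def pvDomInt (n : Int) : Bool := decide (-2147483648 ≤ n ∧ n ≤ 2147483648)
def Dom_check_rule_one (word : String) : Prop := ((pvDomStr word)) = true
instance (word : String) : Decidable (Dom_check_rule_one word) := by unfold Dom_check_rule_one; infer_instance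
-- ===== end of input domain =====

-- B replaces A's positional scan by substring-containment tests for each of the 25 two-vowel patterns; alternative strategy, same results.

-- ===== PORT A =====
def moeum : List Char := ['a', 'e', 'i', 'o', 'u']

-- A's loop `for i in range(len(word)-1)` with early `return True`, as index recursion
def checkLoopA (cs : List Char) (i : Nat) : Bool :=
  if h : i + 1 < cs.length then
    if moeum.contains (cs[i]'(by omega)) then
      if moeum.contains (cs[i+1]'h) then true
      else checkLoopA cs (i+1)   -- `i += i` in the body has no effect on the for-loop
    else checkLoopA cs (i+1)
  else false
termination_by cs.length - i

def check_rule_one (word : String) : Bool := checkLoopA word.toList 0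

-- ===== PORT B =====
-- any(a + b in word for a in "aeiou" for b in "aeiou")
def check_rule_one_alt (word : String) : Bool :=
  "aeiou".toList.any fun a =>
    "aeiou".toList.any fun b =>
      PySem.Str.isIn (String.ofList [a, b]) word

-- ===== PRECONDITION & SPEC =====
def Spec_check_rule_one (word : String) (out : Bool) : Prop := out = check_rule_one_alt word
instance (word : String) (out : Bool) : Decidable (Spec_check_rule_one word out) := by unfold Spec_check_rule_one; infer_instance

-- ===== CLAIM (what is proved, stated in full; the proofs are below) =====
def Claim_equal_check_rule_one : Prop := ∀ (word : String), Dom_check_rule_one word → Spec_check_rule_one word (check_rule_one word)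

-- ===== LEMMAS AND PROOFS =====

-- A's scan, as a predicate on the suffix list: some adjacent vowel pair exists
def pairsAny (l : List Char) : Bool :=
  (l.zip l.tail).any fun p => moeum.contains p.1 && moeum.contains p.2

theorem pairsAny_cons_cons (a b : Char) (r : List Char) :
    pairsAny (a :: b :: r) =
      ((moeum.contains a && moeum.contains b) || pairsAny (b :: r)) := by
  simp [pairsAny]

theorem checkLoopA_eq_pairsAny (cs : List Char) (i : Nat) :
    checkLoopA cs i = pairsAny (cs.drop i) := by
  fun_induction checkLoopA cs i with
  | case1 i h hv1 hv2 =>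
    have hd : cs.drop i = cs[i] :: cs.drop (i+1) := List.drop_eq_getElem_cons (by omega)
    have hd2 : cs.drop (i+1) = cs[i+1] :: cs.drop (i+2) := List.drop_eq_getElem_cons h
    rw [hd, hd2, pairsAny_cons_cons, hv1, hv2]; simp
  | case2 i h hv1 hv2 ih =>
    simp only [Bool.not_eq_true] at hv2
    have hd : cs.drop i = cs[i] :: cs.drop (i+1) := List.drop_eq_getElem_cons (by omega)
    have hd2 : cs.drop (i+1) = cs[i+1] :: cs.drop (i+2) := List.drop_eq_getElem_cons h
    rw [hd]; conv_lhs => rw [ih, hd2]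
    rw [hd2, pairsAny_cons_cons, hv1, hv2]; simp [← hd2]
  | case3 i h hv1 ih =>
    simp only [Bool.not_eq_true] at hv1
    have hd : cs.drop i = cs[i] :: cs.drop (i+1) := List.drop_eq_getElem_cons (by omega)
    by_cases h2 : i + 1 < cs.length
    · have hd2 : cs.drop (i+1) = cs[i+1] :: cs.drop (i+2) := List.drop_eq_getElem_cons h2
      rw [ih, hd, hd2, pairsAny_cons_cons, hv1]; simp [← hd2]
    · have hd2 : cs.drop (i+1) = ([] : List Char) := by
        apply List.drop_eq_nil_of_le; omega
      rw [ih, hd, hd2]; simp [pairsAny]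
  | case4 i h =>
    have hl : (cs.drop i).length ≤ 1 := by rw [List.length_drop]; omega
    rcases hcs : cs.drop i with _ | ⟨a, _ | ⟨b, t⟩⟩
    · simp [pairsAny]
    · simp [pairsAny]
    · rw [hcs] at hl; simp at hl

-- adjacent vowel pair in the scan ↔ some two-vowel word is an infix
theorem pairsAny_iff_infix (l : List Char) :
    pairsAny l = true ↔ ∃ a ∈ moeum, ∃ b ∈ moeum, [a, b] <:+: l := by
  induction l with
  | nil =>
    simp [pairsAny]
  | cons x t ih =>
    cases t with
    | nil =>
      simp only [pairsAny, List.tail, List.zip_nil_right, List.any_nil]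
      constructor
      · intro h; cases h
      · rintro ⟨a, _, b, _, hinf⟩
        have := hinf.length_le
        simp at this
    | cons y r =>
      rw [pairsAny_cons_cons]
      constructor
      · intro h
        rcases Bool.or_eq_true_iff.mp h with h1 | h1
        · rcases Bool.and_eq_true_iff.mp h1 with ⟨hx, hy⟩
          exact ⟨x, by simpa using hx, y, by simpa using hy,
            ⟨[], r, by simp⟩⟩
        · rcases ih.mp h1 with ⟨a, ha, b, hb, hinf⟩
          exact ⟨a, ha, b, hb, hinf.trans (List.suffix_cons x (y::r)).isInfix⟩
      · rintro ⟨a, ha, b, hb, hinf⟩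
        rcases (List.infix_cons_iff).mp hinf with hpre | hinf'
        · rcases List.cons_prefix_cons.mp hpre with ⟨rfl, hpre2⟩
          rcases List.cons_prefix_cons.mp hpre2 with ⟨rfl, _⟩
          apply Bool.or_eq_true_iff.mpr; left
          simp_all
        · apply Bool.or_eq_true_iff.mpr; right
          exact ih.mpr ⟨a, ha, b, hb, hinf'⟩

-- ===== VERDICT (by name: the statement is the Claim_ definition above) =====
theorem check_rule_one_spec : Claim_equal_check_rule_one := by
  intro word _
  unfold Spec_check_rule_one check_rule_one check_rule_one_alt
  rw [checkLoopA_eq_pairsAny]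
  simp only [List.drop_zero]
  rcases h : pairsAny word.toList with _ | _
  · symm
    simp only [List.any_eq_false]
    intro a ha hany
    rcases List.any_eq_true.mp hany with ⟨b, hb, hcon⟩
    have hinf := (PySem.Str.isIn_iff_infix _ _).mp hcon
    have : pairsAny word.toList = true := by
      apply (pairsAny_iff_infix _).mpr
      exact ⟨a, by simpa [moeum] using ha, b, by simpa [moeum] using hb, by simpa using hinf⟩
    rw [h] at this; cases this
  · symm
    rcases (pairsAny_iff_infix _).mp h with ⟨a, ha, b, hb, hinf⟩
    simp only [List.any_eq_true]
    exact ⟨a, by simpa [moeum] using ha, b, by simpa [moeum] using hb,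
      (PySem.Str.isIn_iff_infix _ _).mpr (by simpa using hinf)⟩
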